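-- pv_equiv track=rewrite | github.com/Mute-xD/Python_Utility | PythonPlus/dataVisualization/7_json.py | weekdayReplace
-- ===== SOURCE A (Python) =====
-- def weekdayReplace(string: str):
--     replace_dict = {'Monday': 'MON',
--                     'Tuesday': 'TUE',
--                     'Wednesday': 'WED',
--                     'Thursday': 'THU',
--                     'Friday': 'FRI',
--                     'Saturday': 'SAT',
--                     'Sunday': 'SUN'}
--     for key, value in replace_dict.items():
--         string = string.replace(key, value)
--     return string
-- ===== SOURCE B (Python) =====
-- def weekdayReplace(string: str):
--     table = [('Monday', 'MON'), ('Tuesday', 'TUE'), ('Wednesday', 'WED'),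
--              ('Thursday', 'THU'), ('Friday', 'FRI'), ('Saturday', 'SAT'),
--              ('Sunday', 'SUN')]
--     out = []
--     i = 0
--     n = len(string)
--     while i < n:
--         for key, value in table:
--             if string.startswith(key, i):
--                 out.append(value)
--                 i += len(key)
--                 break
--         else:
--             out.append(string[i])
--             i += 1
--     return ''.join(out)
-- ===== Notes on version B (the rewrite author's own statement) =====
-- stated objective: alternative
-- what changed: Replaces seven independent full-string replace passes (one per weekday, each building an intermediate string) by a single left-to-right scan that tries each weekday name at the current position and emits its abbreviation or the current character, building the output once.
import Mathlib
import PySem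

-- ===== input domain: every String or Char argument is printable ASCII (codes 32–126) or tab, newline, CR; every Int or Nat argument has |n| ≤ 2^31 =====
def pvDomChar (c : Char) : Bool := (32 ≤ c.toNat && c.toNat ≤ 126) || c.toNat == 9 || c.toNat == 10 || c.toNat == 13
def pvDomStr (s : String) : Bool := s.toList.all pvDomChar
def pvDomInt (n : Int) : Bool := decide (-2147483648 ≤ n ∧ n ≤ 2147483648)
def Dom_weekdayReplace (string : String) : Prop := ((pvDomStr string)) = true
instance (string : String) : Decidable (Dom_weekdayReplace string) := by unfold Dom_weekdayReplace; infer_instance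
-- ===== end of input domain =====

-- B replaces A's seven independent full-string replace passes by one left-to-right scan
-- that tries each weekday name at the current position (objective: alternative single-pass algorithm).

-- ===== PORT A =====
def weekdayReplace (string : String) : String :=
  let replaceDict : List (String × String) :=
    [("Monday", "MON"), ("Tuesday", "TUE"), ("Wednesday", "WED"), ("Thursday", "THU"),
     ("Friday", "FRI"), ("Saturday", "SAT"), ("Sunday", "SUN")]
  replaceDict.foldl (fun s kv => PySem.Str.replace s kv.1 kv.2) string

-- ===== PORT B =====
-- the while loop of Source B: at each position try the table keys in order; on a match emit
-- the abbreviation and skip the key, otherwise emit the character (fuel = remaining length)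
def wkTable : List (List Char × List Char) :=
  [("Monday".toList, "MON".toList), ("Tuesday".toList, "TUE".toList),
   ("Wednesday".toList, "WED".toList), ("Thursday".toList, "THU".toList),
   ("Friday".toList, "FRI".toList), ("Saturday".toList, "SAT".toList),
   ("Sunday".toList, "SUN".toList)]

def wkScanGo (T : List (List Char × List Char)) : Nat → List Char → List Char
  | 0, l => l
  | _ + 1, [] => []
  | fuel + 1, c :: t =>
    match T.find? (fun q => q.1.isPrefixOf (c :: t)) with
    | some kv => kv.2 ++ wkScanGo T fuel (List.drop kv.1.length (c :: t))
    | none => c :: wkScanGo T fuel t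

def wkScan (T : List (List Char × List Char)) (l : List Char) : List Char :=
  wkScanGo T l.length l

def weekdayReplace_alt (string : String) : String :=
  String.ofList (wkScan wkTable string.toList)

-- ===== PRECONDITION & SPEC =====
def Spec_weekdayReplace (string : String) (out : String) : Prop := out = weekdayReplace_alt string
instance (string : String) (out : String) : Decidable (Spec_weekdayReplace string out) := by unfold Spec_weekdayReplace; infer_instance

-- ===== CLAIM (what is proved, stated in full; the proofs are below) =====
def Claim_equal_weekdayReplace : Prop := ∀ (string : String), Dom_weekdayReplace string → Spec_weekdayReplace string (weekdayReplace string)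

-- ===== LEMMAS AND PROOFS =====

def KeysNE (T : List (List Char × List Char)) : Prop := ∀ kv ∈ T, kv.1 ≠ []

theorem prefix_split {α : Type} (k v u : List α) (h : k <+: v ++ u) : k <+: v ∨ v <+: k :=
  List.prefix_or_prefix_of_prefix h (List.prefix_append v u)

theorem prefix_drop {α : Type} (k X : List α) (m : Nat) (h : k <+: X) : k.drop m <+: X.drop m := by
  obtain ⟨r, rfl⟩ := h
  rw [List.drop_append]
  exact List.prefix_append _ _

theorem prefix_cons_elim {α : Type} (k t : List α) (c : α) (hk : k ≠ []) (h : k <+: c :: t) :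
    ∃ k', k = c :: k' ∧ k' <+: t := by
  cases k with
  | nil => exact absurd rfl hk
  | cons a k' =>
    rw [List.cons_prefix_cons] at h
    exact ⟨k', by rw [h.1], h.2⟩

theorem key_len (T : List (List Char × List Char)) (hne : KeysNE T)
    (kv : List Char × List Char) (h : kv ∈ T) : 1 ≤ kv.1.length :=
  List.length_pos_iff.mpr (hne kv h)

theorem wkScanGo_fuel (T : List (List Char × List Char)) (hne : KeysNE T) :
    ∀ f l, l.length ≤ f → wkScanGo T f l = wkScan T l := by
  intro f
  induction f using Nat.strong_induction_on with
  | _ f ih =>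
    intro l hl
    match f, l with
    | 0, [] => rfl
    | _ + 1, [] => rfl
    | f + 1, c :: t =>
      simp only [List.length_cons] at hl
      have ht : t.length ≤ f := by omega
      show wkScanGo T (f + 1) (c :: t) = wkScanGo T (t.length + 1) (c :: t)
      rw [wkScanGo, wkScanGo]
      cases hd : T.find? (fun q => q.1.isPrefixOf (c :: t)) with
      | none =>
        simp only
        rw [ih f (by omega) t ht, ih t.length (by omega) t le_rfl]
      | some kv =>
        simp only
        have hmem := List.mem_of_find?_eq_some hd
        have hlen : 1 ≤ kv.1.length := key_len T hne kv hmem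
        have hdl : (List.drop kv.1.length (c :: t)).length ≤ t.length := by
          simp only [List.length_drop, List.length_cons]; omega
        rw [ih f (by omega) _ (le_trans hdl ht), ih t.length (by omega) _ hdl]

theorem wkScan_step_some (T : List (List Char × List Char)) (hne : KeysNE T)
    (l : List Char) (kv : List Char × List Char)
    (hf : T.find? (fun q => q.1.isPrefixOf l) = some kv) :
    wkScan T l = kv.2 ++ wkScan T (l.drop kv.1.length) := by
  have hmem := List.mem_of_find?_eq_some hf
  have hpre : kv.1.isPrefixOf l = true := by
    have := List.find?_some hf; simpa using this
  cases l with
  | nil =>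
    exfalso
    apply hne kv hmem
    have : kv.1 <+: ([] : List Char) := List.isPrefixOf_iff_prefix.mp hpre
    exact List.prefix_nil.mp this
  | cons c t =>
    have hlen : 1 ≤ kv.1.length := key_len T hne kv hmem
    show wkScanGo T (t.length + 1) (c :: t) = _
    rw [wkScanGo, hf]
    dsimp only
    congr 1
    apply wkScanGo_fuel T hne
    simp only [List.length_drop, List.length_cons]; omega

theorem wkScan_step_none (T : List (List Char × List Char)) (_hne : KeysNE T)
    (c : Char) (t : List Char)
    (hf : T.find? (fun q => q.1.isPrefixOf (c :: t)) = none) :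
    wkScan T (c :: t) = c :: wkScan T t := by
  show wkScanGo T (t.length + 1) (c :: t) = _
  rw [wkScanGo, hf]
  dsimp only
  rfl

theorem wkScan_nil (T : List (List Char × List Char)) : wkScan T [] = [] := rfl

-- scanning past a prefix inside which no table key can start
theorem scan_protected (T : List (List Char × List Char)) (hne : KeysNE T) :
    ∀ (v u : List Char),
      (∀ kv ∈ T, ∀ p, p < v.length → ¬ kv.1 <+: v.drop p ∧ ¬ v.drop p <+: kv.1) →
      wkScan T (v ++ u) = v ++ wkScan T u := by
  intro v
  induction v with
  | nil => intro u _; rfl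
  | cons c v' ih =>
    intro u hv
    have hf : T.find? (fun q => q.1.isPrefixOf ((c :: v') ++ u)) = none := by
      apply List.find?_eq_none.mpr
      intro kv hmem hp
      have hp' : kv.1 <+: (c :: v') ++ u := List.isPrefixOf_iff_prefix.mp hp
      have h0 := hv kv hmem 0 (by simp)
      simp only [List.drop_zero] at h0
      rcases prefix_split kv.1 (c :: v') u hp' with h | h
      · exact h0.1 h
      · exact h0.2 h
    rw [List.cons_append] at hf ⊢
    rw [wkScan_step_none T hne c (v' ++ u) hf]
    rw [ih u (by
      intro kv hmem p hp
      have := hv kv hmem (p + 1) (by simpa using Nat.succ_lt_succ hp)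
      simpa using this)]
    rfl

-- first-match characterization of the scan
theorem scan_cases (T : List (List Char × List Char)) (hne : KeysNE T) :
    ∀ (l : List Char),
      wkScan T l = l ∨
      ∃ a kv b, kv ∈ T ∧ l = a ++ kv.1 ++ b ∧
        wkScan T l = a ++ kv.2 ++ wkScan T b ∧
        (∀ p, p < a.length → T.find? (fun q => q.1.isPrefixOf (l.drop p)) = none) := by
  have main : ∀ n l, List.length l ≤ n →
      wkScan T l = l ∨
      ∃ a kv b, kv ∈ T ∧ l = a ++ kv.1 ++ b ∧
        wkScan T l = a ++ kv.2 ++ wkScan T b ∧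
        (∀ p, p < a.length → T.find? (fun q => q.1.isPrefixOf (l.drop p)) = none) := by
    intro n
    induction n with
    | zero =>
      intro l hl
      have : l = [] := List.length_eq_zero_iff.mp (Nat.le_zero.mp hl)
      subst this; exact Or.inl rfl
    | succ n ih =>
      intro l hl
      cases l with
      | nil => exact Or.inl rfl
      | cons c t =>
        simp only [List.length_cons] at hl
        cases hd : T.find? (fun q => q.1.isPrefixOf (c :: t)) with
        | some kv =>
          right
          have hmem := List.mem_of_find?_eq_some hd
          have hpre : kv.1 <+: c :: t := by
            have := List.find?_some hd
            exact List.isPrefixOf_iff_prefix.mp (by simpa using this)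
          obtain ⟨b, hb⟩ := hpre
          refine ⟨[], kv, b, hmem, by simpa using hb.symm, ?_, by intro p hp; simp at hp⟩
          have hdrop : (c :: t).drop kv.1.length = b := by
            rw [← hb, List.drop_append]
            simp
          rw [wkScan_step_some T hne _ kv hd, hdrop]
          simp
        | none =>
          rcases ih t (by omega) with h | ⟨a, kv, b, hmem, hteq, hscan, hnom⟩
          · left
            rw [wkScan_step_none T hne c t hd, h]
          · right
            refine ⟨c :: a, kv, b, hmem, by simp [hteq], ?_, ?_⟩
            · rw [wkScan_step_none T hne c t hd, hscan]; simp
            · intro p hp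
              cases p with
              | zero => simpa using hd
              | succ p' =>
                simp only [List.length_cons] at hp
                have := hnom p' (by omega)
                simpa using this
  intro l; exact main l.length l le_rfl

-- the key fusion lemma: a final single-key pass over the scan of T equals the scan of T ++ [(k,v)]
theorem scan_fuse (T : List (List Char × List Char)) (k v : List Char)
    (hne : KeysNE T) (hk : k ≠ [])
    (hC3 : ∀ kv ∈ T, ∀ p, p < kv.2.length → ¬ k <+: kv.2.drop p ∧ ¬ kv.2.drop p <+: k)
    (hC5 : ∀ kv ∈ T, ∀ q, 1 ≤ q → q < k.length → ¬ kv.1 <+: k.drop q ∧ ¬ k.drop q <+: kv.1)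
    (hC6 : ∀ kv ∈ T, ∀ q, 1 ≤ q → q < k.length → ¬ k.drop q <+: kv.2 ∧ ¬ kv.2 <+: k.drop q) :
    ∀ l, wkScan [(k, v)] (wkScan T l) = wkScan (T ++ [(k, v)]) l := by
  have hne1 : KeysNE [(k, v)] := by
    intro kv hkv
    simp only [List.mem_singleton] at hkv
    subst hkv; exact hk
  have hneA : KeysNE (T ++ [(k, v)]) := by
    intro kv hkv
    rcases List.mem_append.mp hkv with h | h
    · exact hne kv h
    · simp only [List.mem_singleton] at h; subst h; exact hk
  have main : ∀ n l, List.length l ≤ n →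
      wkScan [(k, v)] (wkScan T l) = wkScan (T ++ [(k, v)]) l := by
    intro n
    induction n using Nat.strong_induction_on with
    | _ n ih =>
      intro l hl
      cases l with
      | nil => rfl
      | cons c t =>
        simp only [List.length_cons] at hl
        cases hd : T.find? (fun q => q.1.isPrefixOf (c :: t)) with
        | some kv =>
          have hmem := List.mem_of_find?_eq_some hd
          have hlen1 : 1 ≤ kv.1.length := key_len T hne kv hmem
          have hstepT := wkScan_step_some T hne _ kv hd
          have hdA : (T ++ [(k, v)]).find? (fun q => q.1.isPrefixOf (c :: t)) = some kv := by
            rw [List.find?_append, hd]; rfl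
          have hstepA := wkScan_step_some (T ++ [(k, v)]) hneA _ kv hdA
          rw [hstepT, hstepA]
          have hprot : wkScan [(k, v)] (kv.2 ++ wkScan T ((c :: t).drop kv.1.length)) =
              kv.2 ++ wkScan [(k, v)] (wkScan T ((c :: t).drop kv.1.length)) := by
            apply scan_protected [(k, v)] hne1
            intro kv' hkv' p hp
            simp only [List.mem_singleton] at hkv'
            subst hkv'
            exact (hC3 kv hmem p hp)
          rw [hprot]
          congr 1
          apply ih t.length (by omega) _
          simp only [List.length_drop, List.length_cons]; omega
        | none =>
          have hstepT := wkScan_step_none T hne c t hd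
          by_cases hkp : k <+: c :: t
          · -- the new key matches here; it survives the T-scan of the tail
            obtain ⟨k', hkk, hk't⟩ := prefix_cons_elim k t c hk hkp
            have hklen : k.length = k'.length + 1 := by rw [hkk]; rfl
            -- no key of T can start inside k (positions 1 .. |k|-1)
            have hinside : ∀ (w : List Char) (p : Nat), p < k'.length →
                ∀ kv ∈ T, ¬ kv.1 <+: k'.drop p ++ w := by
              intro w p hp kv hmem hpre
              have hq := hC5 kv hmem (p + 1) (by omega) (by omega)
              have : k.drop (p + 1) = k'.drop p := by rw [hkk]; rfl
              rw [← this] at hpre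
              rcases prefix_split kv.1 (k.drop (p + 1)) w hpre with h | h
              · exact hq.1 h
              · exact hq.2 h
            obtain ⟨r, hr⟩ := hk't
            -- T-scan leaves k' in place
            have hscanT : wkScan T t = k' ++ wkScan T r := by
              rw [← hr]
              apply scan_protected T hne
              intro kv hmem p hp
              constructor
              · intro h
                exact hinside [] p hp kv hmem (by simpa using h)
              · intro h
                obtain ⟨z, hz⟩ := h
                exact hinside z p hp kv hmem (by rw [hz])
            have hmatch : k <+: c :: wkScan T t := by
              rw [hscanT, hkk]
              exact ⟨wkScan T r, by simp⟩
            have hd1 : (([(k, v)] : List (List Char × List Char)).find?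
                (fun q => q.1.isPrefixOf (c :: wkScan T t))) = some (k, v) := by
              simp [List.find?, List.isPrefixOf_iff_prefix.mpr hmatch]
            rw [hstepT, wkScan_step_some [(k, v)] hne1 _ (k, v) hd1]
            have hdrop1 : (c :: wkScan T t).drop k.length = wkScan T r := by
              rw [hscanT, hklen]
              simp
            rw [hdrop1]
            have hdA : (T ++ [(k, v)]).find? (fun q => q.1.isPrefixOf (c :: t)) = some (k, v) := by
              rw [List.find?_append, hd]
              simp [List.find?, List.isPrefixOf_iff_prefix.mpr hkp]
            rw [wkScan_step_some (T ++ [(k, v)]) hneA _ (k, v) hdA]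
            have hdrop2 : (c :: t).drop k.length = r := by
              rw [hklen, ← hr]
              simp
            rw [hdrop2]
            congr 1
            apply ih t.length (by omega) r
            rw [← hr]; simp
          · -- the new key does not match here, and the T-scan cannot create a match
            have hnomatch : ¬ k <+: c :: wkScan T t := by
              intro habs
              rcases scan_cases T hne t with h | ⟨a, kv, b, hmem, hteq, hscan, _⟩
              · rw [h] at habs; exact hkp habs
              · rw [hscan] at habs
                by_cases hla : k.length ≤ 1 + a.length
                · have h2 : k <+: (c :: a) ++ (kv.2 ++ wkScan T b) := by simpa using habs
                  have hpre_ca : k <+: c :: a :=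
                    List.prefix_of_prefix_length_le h2 (List.prefix_append _ _)
                      (by simp; omega)
                  apply hkp
                  calc k <+: c :: a := hpre_ca
                    _ <+: c :: t := by
                        rw [hteq]
                        exact ⟨kv.1 ++ b, by simp⟩
                · have hq : 1 ≤ 1 + a.length ∧ 1 + a.length < k.length := ⟨by omega, by omega⟩
                  have hdp : k.drop (1 + a.length) <+: kv.2 ++ wkScan T b := by
                    have h3 := prefix_drop k (c :: (a ++ (kv.2 ++ wkScan T b))) (1 + a.length)
                      (by simpa using habs)
                    have h4 : List.drop (1 + a.length) (c :: (a ++ (kv.2 ++ wkScan T b))) =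
                        kv.2 ++ wkScan T b := by
                      rw [Nat.add_comm, List.drop_succ_cons, List.drop_append]
                      simp
                    rwa [h4] at h3
                  have h6 := hC6 kv hmem (1 + a.length) hq.1 hq.2
                  rcases prefix_split _ kv.2 _ hdp with h | h
                  · exact h6.1 h
                  · exact h6.2 h
            have hd1 : (([(k, v)] : List (List Char × List Char)).find?
                (fun q => q.1.isPrefixOf (c :: wkScan T t))) = none := by
              have hb : k.isPrefixOf (c :: wkScan T t) = false :=
                Bool.eq_false_iff.mpr (fun h => hnomatch (List.isPrefixOf_iff_prefix.mp h))
              simp [List.find?, hb]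
            rw [hstepT, wkScan_step_none [(k, v)] hne1 c (wkScan T t) hd1]
            have hdA : (T ++ [(k, v)]).find? (fun q => q.1.isPrefixOf (c :: t)) = none := by
              rw [List.find?_append, hd]
              have hb : k.isPrefixOf (c :: t) = false :=
                Bool.eq_false_iff.mpr (fun h => hkp (List.isPrefixOf_iff_prefix.mp h))
              simp [List.find?, hb]
            rw [wkScan_step_none (T ++ [(k, v)]) hneA c t hdA]
            congr 1
            exact ih t.length (by omega) t le_rfl
  intro l; exact main l.length l le_rfl

-- PySem's replace IS the single-key scan
theorem replace_go_eq (old new : List Char) (ho : old ≠ []) :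
    ∀ fuel l acc, l.length ≤ fuel →
      PySem.Chars.replace.go old new fuel l acc = acc.reverse ++ wkScan [(old, new)] l := by
  have hne1 : KeysNE [(old, new)] := by
    intro kv hkv
    simp only [List.mem_singleton] at hkv
    subst hkv; exact ho
  have hlen1 : 1 ≤ old.length := List.length_pos_iff.mpr ho
  intro fuel
  induction fuel with
  | zero =>
    intro l acc hl
    have : l = [] := List.length_eq_zero_iff.mp (Nat.le_zero.mp hl)
    subst this
    simp [PySem.Chars.replace.go, wkScan_nil]
  | succ fuel ih =>
    intro l acc hl
    cases l with
    | nil => simp [PySem.Chars.replace.go, wkScan_nil]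
    | cons c t =>
      simp only [List.length_cons] at hl
      rw [PySem.Chars.replace.go]
      by_cases hp : old.isPrefixOf (c :: t)
      · simp only [hp, if_true]
        have hd1 : (([(old, new)] : List (List Char × List Char)).find?
            (fun q => q.1.isPrefixOf (c :: t))) = some (old, new) := by
          simp [List.find?, hp]
        rw [wkScan_step_some [(old, new)] hne1 _ (old, new) hd1]
        rw [ih (List.drop old.length (c :: t)) (new.reverse ++ acc)
          (by simp only [List.length_drop, List.length_cons]; omega)]
        simp
      · simp only [hp]
        have hd1 : (([(old, new)] : List (List Char × List Char)).find?
            (fun q => q.1.isPrefixOf (c :: t))) = none := by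
          simp [List.find?, hp]
        rw [wkScan_step_none [(old, new)] hne1 c t hd1]
        rw [ih t (c :: acc) (by omega)]
        simp
  
theorem replace_eq_scan (l old new : List Char) (ho : old ≠ []) :
    PySem.Chars.replace l old new = wkScan [(old, new)] l := by
  rw [PySem.Chars.replace]
  have : old.isEmpty = false := by
    simpa using ho
  rw [this]
  simp only [Bool.false_eq_true, if_false]
  have := replace_go_eq old new ho l.length l [] le_rfl
  simpa using this

-- the seven-pass chain on lists equals the full scan
theorem chain_eq (l : List Char) :
    PySem.Chars.replace (PySem.Chars.replace (PySem.Chars.replace (PySem.Chars.replace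
      (PySem.Chars.replace (PySem.Chars.replace (PySem.Chars.replace l
        "Monday".toList "MON".toList) "Tuesday".toList "TUE".toList)
        "Wednesday".toList "WED".toList) "Thursday".toList "THU".toList)
        "Friday".toList "FRI".toList) "Saturday".toList "SAT".toList)
        "Sunday".toList "SUN".toList
      = wkScan wkTable l := by
  have r0 (x : List Char) := replace_eq_scan x "Monday".toList "MON".toList (by decide)
  have r1 (x : List Char) := replace_eq_scan x "Tuesday".toList "TUE".toList (by decide)
  have r2 (x : List Char) := replace_eq_scan x "Wednesday".toList "WED".toList (by decide)
  have r3 (x : List Char) := replace_eq_scan x "Thursday".toList "THU".toList (by decide)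
  have r4 (x : List Char) := replace_eq_scan x "Friday".toList "FRI".toList (by decide)
  have r5 (x : List Char) := replace_eq_scan x "Saturday".toList "SAT".toList (by decide)
  have r6 (x : List Char) := replace_eq_scan x "Sunday".toList "SUN".toList (by decide)
  have f1 := scan_fuse [("Monday".toList, "MON".toList)]
    "Tuesday".toList "TUE".toList (by unfold KeysNE; decide) (by decide) (by decide) (by decide) (by decide)
  have f2 := scan_fuse [("Monday".toList, "MON".toList), ("Tuesday".toList, "TUE".toList)]
    "Wednesday".toList "WED".toList (by unfold KeysNE; decide) (by decide) (by decide) (by decide) (by decide)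
  have f3 := scan_fuse [("Monday".toList, "MON".toList), ("Tuesday".toList, "TUE".toList), ("Wednesday".toList, "WED".toList)]
    "Thursday".toList "THU".toList (by unfold KeysNE; decide) (by decide) (by decide) (by decide) (by decide)
  have f4 := scan_fuse [("Monday".toList, "MON".toList), ("Tuesday".toList, "TUE".toList), ("Wednesday".toList, "WED".toList), ("Thursday".toList, "THU".toList)]
    "Friday".toList "FRI".toList (by unfold KeysNE; decide) (by decide) (by decide) (by decide) (by decide)
  have f5 := scan_fuse [("Monday".toList, "MON".toList), ("Tuesday".toList, "TUE".toList), ("Wednesday".toList, "WED".toList), ("Thursday".toList, "THU".toList), ("Friday".toList, "FRI".toList)]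
    "Saturday".toList "SAT".toList (by unfold KeysNE; decide) (by decide) (by decide) (by decide) (by decide)
  have f6 := scan_fuse [("Monday".toList, "MON".toList), ("Tuesday".toList, "TUE".toList), ("Wednesday".toList, "WED".toList), ("Thursday".toList, "THU".toList), ("Friday".toList, "FRI".toList), ("Saturday".toList, "SAT".toList)]
    "Sunday".toList "SUN".toList (by unfold KeysNE; decide) (by decide) (by decide) (by decide) (by decide)
  simp only [List.cons_append, List.nil_append] at f1 f2 f3 f4 f5 f6
  rw [r0, r1, f1, r2, f2, r3, f3, r4, f4, r5, f5, r6, f6]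
  rfl

-- ===== VERDICT (by name: the statement is the Claim_ definition above) =====
theorem weekdayReplace_spec : Claim_equal_weekdayReplace := by
  unfold Claim_equal_weekdayReplace Spec_weekdayReplace
  intro s _
  show weekdayReplace s = weekdayReplace_alt s
  unfold weekdayReplace weekdayReplace_alt
  simp only [List.foldl, PySem.Str.replace, String.toList_ofList]
  exact congrArg String.ofList (chain_eq s.toList)
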